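-- pv_equiv track=rewrite | github.com/magnmaeh/slack-stats | filter.py | filter_escapes
-- ===== SOURCE A (Python) =====
-- def filter_escapes(string):
--     escaped_string = ""
--     escape = 0
--     for c in string:
--         if c == '<':
--             escape = 1
--         elif c == '>':
--             escape = 0
--         else:
--             if not escape:
--                 escaped_string += c
--     return escaped_string
-- ===== SOURCE B (Python) =====
-- def filter_escapes(string):
--     out = []
--     it = iter(string)
--     for c in it:
--         if c == '<':
--             # consume the bracketed region up to (and including) the next '>'
--             for d in it:
--                 if d == '>':
--                     break
--         elif c != '>':
--             out.append(c)
--     return ''.join(out)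
-- ===== Notes on version B (the rewrite author's own statement) =====
-- stated objective: alternative
-- what changed: Replaces the escape-flag state machine and repeated string concatenation with a nested-iterator skip: on '<' an inner loop consumes the iterator up to the next '>', kept characters are appended to a list and joined once.
import Mathlib
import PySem

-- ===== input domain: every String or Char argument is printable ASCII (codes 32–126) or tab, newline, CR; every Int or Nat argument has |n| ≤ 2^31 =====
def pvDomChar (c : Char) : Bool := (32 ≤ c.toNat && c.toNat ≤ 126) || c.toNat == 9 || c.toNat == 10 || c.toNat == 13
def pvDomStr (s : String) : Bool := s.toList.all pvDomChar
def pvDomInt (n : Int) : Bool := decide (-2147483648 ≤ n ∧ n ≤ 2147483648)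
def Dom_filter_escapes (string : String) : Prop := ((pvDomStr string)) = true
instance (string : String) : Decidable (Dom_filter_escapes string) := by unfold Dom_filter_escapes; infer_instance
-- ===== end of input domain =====

-- B replaces A's escape-flag state machine with a nested-iterator skip (mutual keep/skip phases); equivalent on all inputs.


-- ===== PORT A =====
-- the loop: state (escaped_string, escape); escape holds only 0 or 1, 'if not escape' is escape == 0
def pvStepA (st : List Char × Int) (c : Char) : List Char × Int :=
  if c = '<' then (st.1, 1)
  else if c = '>' then (st.1, 0)
  else if st.2 == 0 then (st.1 ++ [c], st.2) else st

def filter_escapes (string : String) : String :=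
  String.mk (string.toList.foldl pvStepA ([], 0)).1

-- ===== PORT B =====
-- outer loop of Source B: keep characters, hand the iterator to the inner loop on '<'
mutual
def pvKeepB : List Char → List Char
  | [] => []
  | c :: cs => if c = '<' then pvSkipB cs
               else if c = '>' then pvKeepB cs
               else c :: pvKeepB cs
-- inner loop of Source B: consume up to and including the next '>'
def pvSkipB : List Char → List Char
  | [] => []
  | c :: cs => if c = '>' then pvKeepB cs else pvSkipB cs
end

def filter_escapes_alt (string : String) : String :=
  String.mk (pvKeepB string.toList)

-- ===== PRECONDITION & SPEC =====
def Spec_filter_escapes (string : String) (out : String) : Prop := out = filter_escapes_alt string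
instance (string : String) (out : String) : Decidable (Spec_filter_escapes string out) := by unfold Spec_filter_escapes; infer_instance

-- ===== CLAIM (what is proved, stated in full; the proofs are below) =====
def Claim_equal_filter_escapes : Prop := ∀ (string : String), Dom_filter_escapes string → Spec_filter_escapes string (filter_escapes string)

-- ===== LEMMAS AND PROOFS =====
-- loop invariant: with escape = 0 the fold appends pvKeepB, with escape = 1 it appends pvSkipB
theorem pvInv (cs : List Char) : ∀ acc : List Char,
    (cs.foldl pvStepA (acc, 0)).1 = acc ++ pvKeepB cs ∧
    (cs.foldl pvStepA (acc, 1)).1 = acc ++ pvSkipB cs := by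
  induction cs with
  | nil => intro acc; simp [pvKeepB, pvSkipB]
  | cons c cs ih =>
    intro acc
    by_cases h1 : c = '<' <;> by_cases h2 : c = '>' <;>
      simp [List.foldl, pvStepA, pvKeepB, pvSkipB, h1, h2, ih]

-- ===== VERDICT (by name: the statement is the Claim_ definition above) =====
theorem filter_escapes_spec : Claim_equal_filter_escapes := by
  intro s _
  unfold Spec_filter_escapes filter_escapes filter_escapes_alt
  rw [(pvInv s.toList []).1]
  simp
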